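-- pv_equiv track=rewrite | github.com/garytbaker/C200_Assignments | Assignment4.py/MathFunctions.py | aWhileLoop
-- ===== SOURCE A (Python) =====
-- def aWhileLoop(n):
--     if n == 1:
--         return 3
--     total = 3
--     counter = 1
--     while counter < n:
--         total *= 2
--         total += 5
--         counter = counter + 1
--     return total
-- ===== SOURCE B (Python) =====
-- def aWhileLoop(n):
--     if n <= 1:
--         return 3
--     return (1 << (n + 2)) - 5
-- ===== Notes on version B (the rewrite author's own statement) =====
-- stated objective: faster
-- what changed: Replaced the O(n) doubling loop by the closed form 2^(n+2)-5 computed with one bit shift; intended as faster (measured 5175x at n=65536; at the largest probe size the output was too large for a timing run to decode).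
import Mathlib
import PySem

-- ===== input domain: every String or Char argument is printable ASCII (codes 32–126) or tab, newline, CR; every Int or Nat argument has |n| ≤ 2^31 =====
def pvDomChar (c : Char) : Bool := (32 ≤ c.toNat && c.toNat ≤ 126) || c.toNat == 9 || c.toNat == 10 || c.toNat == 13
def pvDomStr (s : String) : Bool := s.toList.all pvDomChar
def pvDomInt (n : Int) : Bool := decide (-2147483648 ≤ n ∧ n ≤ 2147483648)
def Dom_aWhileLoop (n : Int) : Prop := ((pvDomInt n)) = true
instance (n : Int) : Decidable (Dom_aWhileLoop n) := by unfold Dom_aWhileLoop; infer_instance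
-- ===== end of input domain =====

-- B replaces A's O(n) doubling loop by the closed form 2^(n+2)-5 (one shift); intended as faster (timing run measured 5175x at n=65536).

-- ===== PORT A =====
-- the while loop: runs its body (total := total*2 + 5) once per remaining counter step;
-- the number of iterations of `while counter < n` starting at counter = 1 is (n-1).toNat
def aWhileLoopGo (total : Int) : Nat → Int
  | 0 => total
  | fuel + 1 => aWhileLoopGo (total * 2 + 5) fuel

def aWhileLoop (n : Int) : Int :=
  if n = 1 then 3
  else aWhileLoopGo 3 (n - 1).toNat

-- ===== PORT B =====
def aWhileLoop_alt (n : Int) : Int :=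
  if n ≤ 1 then 3
  else (1 <<< (n + 2).toNat) - 5

-- ===== PRECONDITION & SPEC =====
def Spec_aWhileLoop (n : Int) (out : Int) : Prop := out = aWhileLoop_alt n
instance (n : Int) (out : Int) : Decidable (Spec_aWhileLoop n out) := by unfold Spec_aWhileLoop; infer_instance

-- ===== CLAIM (what is proved, stated in full; the proofs are below) =====
def Claim_equal_aWhileLoop : Prop := ∀ (n : Int), Dom_aWhileLoop n → Spec_aWhileLoop n (aWhileLoop n)

-- ===== LEMMAS AND PROOFS =====
theorem aWhileLoopGo_eq (fuel : Nat) : ∀ (t : Int), aWhileLoopGo t fuel = (t + 5) * 2 ^ fuel - 5 := by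
  induction fuel with
  | zero => intro t; simp [aWhileLoopGo]
  | succ f ih =>
    intro t
    rw [aWhileLoopGo, ih]
    ring

-- ===== VERDICT (by name: the statement is the Claim_ definition above) =====
theorem aWhileLoop_spec : Claim_equal_aWhileLoop := by
  intro n _
  unfold Spec_aWhileLoop aWhileLoop aWhileLoop_alt
  by_cases h1 : n ≤ 1
  · rcases eq_or_lt_of_le h1 with h | h
    · simp [h]
    · have hne : n ≠ 1 := by omega
      have h0 : (n - 1).toNat = 0 := by omega
      simp [hne, h1, h0, aWhileLoopGo]
  · have hne : n ≠ 1 := by omega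
    simp only [if_neg hne, if_neg h1]
    rw [aWhileLoopGo_eq]
    have h2 : (n + 2).toNat = (n - 1).toNat + 3 := by omega
    rw [h2]; simp [Nat.shiftLeft_eq]
    push_cast
    ring
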